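-- pv_equiv track=rewrite | github.com/nikihowe/matchsticks | utils.py | generate_allowed
-- ===== SOURCE A (Python) =====
-- def generate_allowed(num: int = 100) -> list[list[tuple[int, int]]]:
--   """
--   Generate all allowed moves for layers of length up to num.
--
--   :param num: Up to which size of layer to consider (counts even and odd).
--   :return: A list of allowed moves, in the format (low_idx, high_idx).
--             Position in the list encodes layer size - 1.
--   """
--   all_allowed = []
--   for i in range(1, num + 1):
--     # Define the allowed moves recursively
--     if i == 1:
--       allowed = [(1, 1)]
--     else:
--       allowed = all_allowed[i - 2] + [(j, i) for j in range(1, i + 1)]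
--     all_allowed.append(allowed)
--   return all_allowed
-- ===== SOURCE B (Python) =====
-- def generate_allowed(num: int = 100) -> list[list[tuple[int, int]]]:
--   """Build each layer independently: layer i lists (j, m) for m in 1..i, j in 1..m."""
--   return [[(j, m) for m in range(1, i + 1) for j in range(1, m + 1)]
--           for i in range(1, num + 1)]
-- ===== Notes on version B (the rewrite author's own statement) =====
-- stated objective: simpler
-- what changed: Replaces A's DP-style accumulation that reuses the previously stored layer (indexed out of the growing result list) with an independent direct construction of each layer as a nested comprehension over m in 1..i and j in 1..m.
import Mathlib
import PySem

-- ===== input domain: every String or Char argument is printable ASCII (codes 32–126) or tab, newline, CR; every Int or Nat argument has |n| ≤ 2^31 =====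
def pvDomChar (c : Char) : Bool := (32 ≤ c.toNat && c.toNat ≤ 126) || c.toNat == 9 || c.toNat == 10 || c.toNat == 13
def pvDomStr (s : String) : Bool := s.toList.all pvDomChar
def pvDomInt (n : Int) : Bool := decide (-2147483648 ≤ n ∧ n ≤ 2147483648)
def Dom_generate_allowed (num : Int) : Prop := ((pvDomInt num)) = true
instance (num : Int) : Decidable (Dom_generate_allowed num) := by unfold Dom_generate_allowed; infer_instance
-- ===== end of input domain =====

-- B builds every layer directly by a nested comprehension instead of A's reuse of the previously stored layer (simpler decomposition; same cost).

-- ===== PORT A =====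
def generate_allowed (num : Int) : List (List (Int × Int)) :=
  (PySem.List.pyRange 1 (num + 1) 1).foldl
    (fun all_allowed i =>
      all_allowed ++
        [if i = 1 then [((1 : Int), (1 : Int))]
         else PySem.List.pyGetD all_allowed (i - 2) [] ++
              (PySem.List.pyRange 1 (i + 1) 1).map (fun j => (j, i))])
    []

-- ===== PORT B =====
def pvLayer (i : Int) : List (Int × Int) :=
  (PySem.List.pyRange 1 (i + 1) 1).flatMap
    (fun m => (PySem.List.pyRange 1 (m + 1) 1).map (fun j => (j, m)))

def generate_allowed_alt (num : Int) : List (List (Int × Int)) :=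
  (PySem.List.pyRange 1 (num + 1) 1).map pvLayer

-- ===== PRECONDITION & SPEC =====
def Spec_generate_allowed (num : Int) (out : List (List (Int × Int))) : Prop := out = generate_allowed_alt num
instance (num : Int) (out : List (List (Int × Int))) : Decidable (Spec_generate_allowed num out) := by unfold Spec_generate_allowed; infer_instance

-- ===== CLAIM (what is proved, stated in full; the proofs are below) =====
def Claim_equal_generate_allowed : Prop := ∀ (num : Int), Dom_generate_allowed num → Spec_generate_allowed num (generate_allowed num)

-- ===== LEMMAS AND PROOFS =====

-- layer (n+1) extends layer n by the block of pairs (j, n+1)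
theorem pvLayer_succ (n : Int) (hn : 1 ≤ n) :
    pvLayer (n + 1) =
      pvLayer n ++ (PySem.List.pyRange 1 (n + 2) 1).map (fun j => (j, n + 1)) := by
  unfold pvLayer
  rw [PySem.List.pyRange_one_succ_right (by omega : (1:Int) ≤ n + 1)]
  simp
  ring_nf

-- the foldl over range(1, n+1) equals the map of pvLayer over the same range
theorem pv_main (n : Nat) :
    generate_allowed (n : Int) = (PySem.List.pyRange 1 ((n : Int) + 1) 1).map pvLayer := by
  induction n with
  | zero => decide
  | succ k ih =>
    unfold generate_allowed at *
    have hsplit : PySem.List.pyRange 1 (((k + 1 : Nat) : Int) + 1) 1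
        = PySem.List.pyRange 1 ((k : Int) + 1) 1 ++ [((k : Int) + 1)] := by
      have := PySem.List.pyRange_one_succ_right (a := 1) (b := (k : Int) + 1) (by omega)
      push_cast
      convert this using 2
    rw [hsplit, List.foldl_append, List.map_append, ih]
    simp only [List.foldl_cons, List.foldl_nil, List.map_cons, List.map_nil]
    congr 1
    by_cases hk : k = 0
    · subst hk; decide
    · have hk1 : 1 ≤ k := Nat.one_le_iff_ne_zero.mpr hk
      have hne : ((k : Int) + 1) ≠ 1 := by omega
      rw [if_neg hne]
      have hlen : (PySem.List.pyRange 1 ((k : Int) + 1) 1).length = k := by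
        rw [PySem.List.length_pyRange_one]; omega
      have hidx : PySem.List.pyGetD ((PySem.List.pyRange 1 ((k : Int) + 1) 1).map pvLayer)
          ((k : Int) + 1 - 2) [] = pvLayer (k : Int) := by
        have hnn : (0 : Int) ≤ (k : Int) + 1 - 2 := by omega
        rw [show (k : Int) + 1 - 2 = ((k - 1 : Nat) : Int) by omega,
            PySem.List.pyGetD_natCast]
        have hlt : k - 1 < ((PySem.List.pyRange 1 ((k : Int) + 1) 1).map pvLayer).length := by
          simp [hlen]; omega
        rw [List.getD_eq_getElem _ _ hlt]
        simp only [List.getElem_map, PySem.List.getElem_pyRange_one]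
        congr 1; omega
      rw [hidx]
      have := pvLayer_succ (k : Int) (by exact_mod_cast hk1)
      rw [show (k : Int) + 1 + 1 = (k : Int) + 2 by ring]
      exact congrArg (fun l => [l]) this.symm

-- ===== VERDICT (by name: the statement is the Claim_ definition above) =====
theorem generate_allowed_spec : Claim_equal_generate_allowed := by
  intro num _
  unfold Spec_generate_allowed generate_allowed_alt
  by_cases h : num ≤ 0
  · unfold generate_allowed
    rw [PySem.List.pyRange_one_eq_nil (by omega)]
    rfl
  · obtain ⟨n, rfl⟩ : ∃ n : Nat, num = (n : Int) :=
      ⟨num.toNat, (Int.toNat_of_nonneg (by omega)).symm⟩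
    exact pv_main n
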